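-- pv_equiv track=rewrite | github.com/rahulavasarala/RecursionSolvingTransformer | .ipynb_checkpoints/serialization-checkpoint.py | find_tree_end
-- ===== SOURCE A (Python) =====
-- def find_tree_end(expression_list, start):
--
--     if expression_list[start] not in "*/+-^":#if the start is just a number, the tree end is the index itself
--         return start
--
--     open_count = 2
--
--     for i in range(start + 1, len(expression_list)):
--
--         if expression_list[i] not in "*/+-^":
--             open_count -= 1
--         else:
--             open_count += 1
--
--         if open_count == 0:
--             return i
--
--     return -1
-- ===== SOURCE B (Python) =====
-- def find_tree_end(expression_list, start):
--     if expression_list[start] not in "*/+-^":  # a leaf ends where it starts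
--         return start
--     # operator: descend into the two operand subtrees
--     e1 = -1 if start + 1 >= len(expression_list) else find_tree_end(expression_list, start + 1)
--     if e1 == -1:
--         return -1
--     return -1 if e1 + 1 >= len(expression_list) else find_tree_end(expression_list, e1 + 1)
-- ===== Notes on version B (the rewrite author's own statement) =====
-- stated objective: alternative
-- what changed: Replaced the single left-to-right open_count counter scan with a recursive descent that finds the end of each operand subtree separately and propagates -1 on truncated input.
-- outside the precondition, e.g. on find_tree_end(['1', '+', '2'], -2): A returns 0, B returns -1
import Mathlib
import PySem

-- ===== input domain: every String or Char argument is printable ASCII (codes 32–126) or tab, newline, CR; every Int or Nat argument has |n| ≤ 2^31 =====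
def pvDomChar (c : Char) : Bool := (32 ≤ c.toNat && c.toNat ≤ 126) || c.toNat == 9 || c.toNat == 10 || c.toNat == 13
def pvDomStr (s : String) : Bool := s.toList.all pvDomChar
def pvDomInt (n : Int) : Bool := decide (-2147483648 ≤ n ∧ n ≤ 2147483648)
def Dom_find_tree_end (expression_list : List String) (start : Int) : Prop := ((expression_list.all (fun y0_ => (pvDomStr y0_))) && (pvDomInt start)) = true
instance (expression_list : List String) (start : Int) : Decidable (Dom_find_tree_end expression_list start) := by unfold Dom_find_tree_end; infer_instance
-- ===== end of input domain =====

-- B replaces A's open_count counter scan with a recursive descent over the two operand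
-- subtrees (objective: alternative decomposition, same O(n) cost; return value only).

-- 'tok in "*/+-^"' (Python substring containment, shared by both ports)
def pvIsOp (tok : String) : Bool := PySem.Chars.isIn tok.toList "*/+-^".toList

-- ===== PORT A =====
-- the 'for i in range(start+1, len)' loop with its open_count accumulator and early return
def find_tree_end_go (expression_list : List String) (i : Int) (open_count : Int) : Int :=
  if _h : i < (expression_list.length : Int) then
    let cnt := if ¬ pvIsOp ((PySem.List.pyGet? expression_list i).getD "") then
        open_count - 1 else open_count + 1
    if cnt = 0 then i else find_tree_end_go expression_list (i + 1) cnt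
  else -1
termination_by ((expression_list.length : Int) - i).toNat
decreasing_by omega

def find_tree_end (expression_list : List String) (start : Int) : Int :=
  if ¬ pvIsOp ((PySem.List.pyGet? expression_list start).getD "") then start
  else find_tree_end_go expression_list (start + 1) 2

-- ===== PORT B =====
-- recursive descent; fuel only makes the recursion structural (never exhausted on admitted inputs)
def find_tree_end_alt_go (lst : List String) : Nat → Int → Int
  | 0, _ => -1
  | fuel + 1, idx =>
    if ¬ pvIsOp ((PySem.List.pyGet? lst idx).getD "") then idx
    else
      let e1 := if idx + 1 ≥ (lst.length : Int) then -1 else find_tree_end_alt_go lst fuel (idx + 1)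
      if e1 = -1 then -1
      else if e1 + 1 ≥ (lst.length : Int) then -1 else find_tree_end_alt_go lst fuel (e1 + 1)

def find_tree_end_alt (expression_list : List String) (start : Int) : Int :=
  find_tree_end_alt_go expression_list (expression_list.length + 1) start

-- ===== PRECONDITION & SPEC =====
-- Pre_ excludes out-of-range start (A raises IndexError) and negative in-range start, where
-- A's value relies on Python's negative-index wraparound — outside the natural domain of a
-- prefix-expression index; B returns a different value there.
def Pre_find_tree_end (expression_list : List String) (start : Int) : Prop :=
  0 ≤ start ∧ start < (expression_list.length : Int)
instance (expression_list : List String) (start : Int) : Decidable (Pre_find_tree_end expression_list start) := by unfold Pre_find_tree_end; infer_instance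

def pvWitness_find_tree_end : List String × Int := (["+", "1", "2"], 0)

def Spec_find_tree_end (expression_list : List String) (start : Int) (out : Int) : Prop := out = find_tree_end_alt expression_list start
instance (expression_list : List String) (start : Int) (out : Int) : Decidable (Spec_find_tree_end expression_list start out) := by unfold Spec_find_tree_end; infer_instance

-- ===== CLAIM (what is proved, stated in full; the proofs are below) =====
def Claim_equal_find_tree_end : Prop := ∀ (expression_list : List String) (start : Int), Dom_find_tree_end expression_list start → Pre_find_tree_end expression_list start → Spec_find_tree_end expression_list start (find_tree_end expression_list start)

-- ===== LEMMAS AND PROOFS =====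

-- A's scan returns -1 or an index in [i, len)
theorem go_range (lst : List String) (n : Nat) :
    ∀ i c, ((lst.length : Int) - i).toNat ≤ n →
      find_tree_end_go lst i c = -1 ∨
        (i ≤ find_tree_end_go lst i c ∧ find_tree_end_go lst i c < (lst.length : Int)) := by
  induction n with
  | zero =>
    intro i c hn
    rw [find_tree_end_go]
    have : ¬ i < (lst.length : Int) := by omega
    simp [this]
  | succ n ih =>
    intro i c hn
    rw [find_tree_end_go]
    by_cases h : i < (lst.length : Int)
    · simp only [h, dif_pos]
      set cnt := if ¬ pvIsOp ((PySem.List.pyGet? lst i).getD "") then c - 1 else c + 1 with hc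
      by_cases h0 : cnt = 0
      · simp [h0]; omega
      · simp only [h0, if_false]
        rcases ih (i + 1) cnt (by omega) with h1 | h1
        · exact Or.inl h1
        · exact Or.inr ⟨by omega, h1.2⟩
    · simp [h]

-- splitting A's scan: counting down from c+1 = one subtree (count c), then one more from its end
theorem go_split (lst : List String) (n : Nat) :
    ∀ i c, 0 ≤ i → 1 ≤ c → ((lst.length : Int) - i).toNat ≤ n →
      find_tree_end_go lst i (c + 1) =
        if find_tree_end_go lst i c = -1 then -1
        else find_tree_end_go lst (find_tree_end_go lst i c + 1) 1 := by
  induction n with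
  | zero =>
    intro i c hi hc hn
    have h : ¬ i < (lst.length : Int) := by omega
    rw [find_tree_end_go]
    simp only [h, dif_neg, not_false_iff]
    rw [find_tree_end_go]
    simp [h]
  | succ n ih =>
    intro i c hi hc hn
    by_cases h : i < (lst.length : Int)
    · by_cases hop : pvIsOp ((PySem.List.pyGet? lst i).getD "")
      · -- operator token: both counts increase
        rw [find_tree_end_go]
        simp only [h, dif_pos, hop, not_true_eq_false, if_false]
        have hne1 : ¬ (c + 1 + 1 = 0) := by omega
        simp only [hne1, if_false]
        conv_rhs => rw [find_tree_end_go]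
        simp only [h, dif_pos, hop, not_true_eq_false, if_false]
        have hne2 : ¬ (c + 1 = 0) := by omega
        simp only [hne2, if_false]
        have := ih (i + 1) (c + 1) (by omega) (by omega) (by omega)
        have e1 : c + 1 + 1 = (c + 1) + 1 := by ring
        rw [e1]
        exact this
      · -- operand token: both counts decrease
        rw [find_tree_end_go]
        conv_rhs => rw [find_tree_end_go]
        simp only [h, dif_pos, hop, Bool.false_eq_true, not_false_iff, if_true]
        by_cases hc1 : c = 1
        · subst hc1
          -- LHS: count 2-1 = 1 ≠ 0 → continue with 1; RHS: count 0 → returns i (≠ -1 since 0 ≤ i)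
          have hne : (i : Int) ≠ -1 := by omega
          norm_num [hne]
        · have hL : ¬ (c + 1 - 1 = 0) := by omega
          have hR : ¬ (c - 1 = 0) := by omega
          simp only [hL, hR, if_false]
          have e1 : c + 1 - 1 = (c - 1) + 1 := by ring
          rw [e1]
          exact ih (i + 1) (c - 1) (by omega) (by omega) (by omega)
    · rw [find_tree_end_go]
      simp only [h, dif_neg, not_false_iff]
      rw [find_tree_end_go]
      simp [h]

-- B's descent computes A's count-1 scan
theorem alt_go_eq (lst : List String) (fuel : Nat) :
    ∀ idx, 0 ≤ idx → idx < (lst.length : Int) →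
      ((lst.length : Int) - idx).toNat < fuel →
      find_tree_end_alt_go lst fuel idx = find_tree_end_go lst idx 1 := by
  induction fuel with
  | zero => intro idx _ _ h; omega
  | succ f ih =>
    intro idx h0 hlt hfuel
    rw [find_tree_end_alt_go]
    conv_rhs => rw [find_tree_end_go]
    simp only [hlt, dif_pos]
    by_cases hop : pvIsOp ((PySem.List.pyGet? lst idx).getD "")
    · simp only [hop, not_true_eq_false, if_false]
      have h2 : ¬ ((1 : Int) + 1 = 0) := by omega
      simp only [h2, if_false]
      by_cases hend : idx + 1 ≥ (lst.length : Int)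
      · -- truncated right after the operator: A's scan is over range ∅, returns -1
        simp only [if_pos hend]
        rw [find_tree_end_go]
        have : ¬ idx + 1 < (lst.length : Int) := by omega
        simp [this]
      · simp only [if_neg hend]
        have he1 : find_tree_end_alt_go lst f (idx + 1) = find_tree_end_go lst (idx + 1) 1 :=
          ih (idx + 1) (by omega) (by omega) (by omega)
        rw [he1]
        have hsplit := go_split lst (((lst.length : Int) - (idx + 1)).toNat) (idx + 1) 1
          (by omega) (by omega) (by omega)
        rw [hsplit]
        by_cases hn : find_tree_end_go lst (idx + 1) 1 = -1
        · simp [hn]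
        · simp only [hn, if_neg, not_false_iff]
          rcases go_range lst (((lst.length : Int) - (idx + 1)).toNat) (idx + 1) 1 (by omega)
            with hr | hr
          · exact absurd hr hn
          · set e1 := find_tree_end_go lst (idx + 1) 1 with he
            by_cases hend2 : e1 + 1 ≥ (lst.length : Int)
            · simp only [if_pos hend2]
              rw [find_tree_end_go]
              have : ¬ e1 + 1 < (lst.length : Int) := by omega
              simp [this]
            · simp only [if_neg hend2]
              exact ih (e1 + 1) (by omega) (by omega) (by omega)
    · simp [hop]

-- ===== VERDICT (by name: the statement is the Claim_ definition above) =====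
theorem find_tree_end_spec : Claim_equal_find_tree_end := by
  intro lst start _hDom hPre
  obtain ⟨h0, hlt⟩ := hPre
  unfold Spec_find_tree_end find_tree_end find_tree_end_alt
  have halt : find_tree_end_alt_go lst (lst.length + 1) start = find_tree_end_go lst start 1 :=
    alt_go_eq lst (lst.length + 1) start h0 hlt (by omega)
  rw [halt]
  conv_rhs => rw [find_tree_end_go]
  simp only [hlt, dif_pos]
  by_cases hop : pvIsOp ((PySem.List.pyGet? lst start).getD "")
  · simp [hop]
  · simp [hop]
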